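-- pv_equiv track=rewrite | github.com/michi-system/Reseller | reselling/live_miner_fetch.py | _pick_generic_token
-- ===== SOURCE A (Python) =====
-- from typing import Any, Callable, Dict, List, Optional, Sequence, Tuple
--
-- _QUERY_STOPWORDS = {
--     "THE",
--     "WITH",
--     "FOR",
--     "FROM",
--     "AND",
--     "NEW",
--     "NIB",
--     "JAPAN",
--     "JAPANESE",
--     "UNUSED",
--     "AUTHENTIC",
--     "FREE",
--     "SHIPPING",
--     "新品",
--     "国内正規品",
--     "送料無料",
-- }
--
-- _GENERIC_TOKENS = {
--     "WATCH",
--     "CLOCK",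
--     "SPEAKER",
--     "HEADPHONE",
--     "CAMERA",
--     "LENS",
--     "BAG",
--     "WALLET",
--     "SHOES",
--     "TOY",
--     "FIGURE",
-- }
--
-- def _pick_generic_token(tokens: Sequence[str]) -> str:
--     for token in tokens:
--         if token in _GENERIC_TOKENS:
--             return token
--     for token in reversed(tokens):
--         if any(ch.isdigit() for ch in token):
--             continue
--         if token in _QUERY_STOPWORDS:
--             continue
--         if len(token) >= 4:
--             return token
--     return ""
-- ===== SOURCE B (Python) =====
-- _QUERY_STOPWORDS = {
--     "THE", "WITH", "FOR", "FROM", "AND", "NEW", "NIB", "JAPAN", "JAPANESE",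
--     "UNUSED", "AUTHENTIC", "FREE", "SHIPPING", "新品", "国内正規品", "送料無料",
-- }
--
-- _GENERIC_TOKENS = {
--     "WATCH", "CLOCK", "SPEAKER", "HEADPHONE", "CAMERA", "LENS", "BAG",
--     "WALLET", "SHOES", "TOY", "FIGURE",
-- }
--
--
-- def _is_valid(token):
--     return (not any(ch.isdigit() for ch in token)
--             and token not in _QUERY_STOPWORDS
--             and len(token) >= 4)
--
--
-- def _pick_generic_token(tokens):
--     # Single forward pass: short-circuit on the first generic token,
--     # otherwise remember the last valid token seen so far.
--     last_valid = ""
--     for token in tokens: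
--         if token in _GENERIC_TOKENS:
--             return token
--         if _is_valid(token):
--             last_valid = token
--     return last_valid
-- ===== Notes on version B (the rewrite author's own statement) =====
-- stated objective: simpler
-- what changed: Replaced A's two passes (a forward scan for a generic token, then a reversed scan for the first valid token) by one forward pass keeping a last-valid accumulator and short-circuiting on a generic token.
import Mathlib
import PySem

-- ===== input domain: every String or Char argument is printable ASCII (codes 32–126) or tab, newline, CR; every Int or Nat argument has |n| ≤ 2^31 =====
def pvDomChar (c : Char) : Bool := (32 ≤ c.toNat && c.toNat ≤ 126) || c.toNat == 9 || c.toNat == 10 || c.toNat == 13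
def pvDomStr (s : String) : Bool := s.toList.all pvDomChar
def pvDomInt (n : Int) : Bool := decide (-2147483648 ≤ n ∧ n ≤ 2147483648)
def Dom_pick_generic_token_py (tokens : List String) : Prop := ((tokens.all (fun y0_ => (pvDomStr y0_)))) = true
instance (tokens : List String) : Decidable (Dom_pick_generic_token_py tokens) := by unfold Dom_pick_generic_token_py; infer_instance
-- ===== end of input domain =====

-- B fuses A's two scans (forward for a generic token, reversed for a valid one) into one forward pass with a last-valid accumulator; objective: simpler.


-- module constants (_QUERY_STOPWORDS, _GENERIC_TOKENS: Python sets of string literals)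
def pvQueryStopwords : List String :=
  ["THE", "WITH", "FOR", "FROM", "AND", "NEW", "NIB", "JAPAN", "JAPANESE",
   "UNUSED", "AUTHENTIC", "FREE", "SHIPPING", "新品", "国内正規品", "送料無料"]

def pvGenericTokens : List String :=
  ["WATCH", "CLOCK", "SPEAKER", "HEADPHONE", "CAMERA", "LENS", "BAG",
   "WALLET", "SHOES", "TOY", "FIGURE"]

-- ===== PORT A =====
-- second loop of A: scan (already reversed) tokens, return first valid one, else ""
def pickA_loop2 : List String → String
  | [] => ""
  | t :: ts =>
    if t.toList.any PySem.Chars.isdigit then pickA_loop2 ts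
    else if pvQueryStopwords.contains t then pickA_loop2 ts
    else if 4 ≤ PySem.Str.len t then t
    else pickA_loop2 ts

-- first loop of A: return the first generic token; at the end fall through to the reversed scan
def pickA_loop1 (tokens : List String) : List String → String
  | [] => pickA_loop2 tokens.reverse
  | t :: ts => if pvGenericTokens.contains t then t else pickA_loop1 tokens ts

def pick_generic_token_py (tokens : List String) : String :=
  pickA_loop1 tokens tokens

-- ===== PORT B =====
-- helper _is_valid of Source B
def pvIsValid (t : String) : Bool :=
  !(t.toList.any PySem.Chars.isdigit) && !(pvQueryStopwords.contains t)
    && decide (4 ≤ PySem.Str.len t)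

-- single forward pass with the last-valid accumulator
def pickB_go (acc : String) : List String → String
  | [] => acc
  | t :: ts =>
    if pvGenericTokens.contains t then t
    else pickB_go (if pvIsValid t then t else acc) ts

def pick_generic_token_py_alt (tokens : List String) : String :=
  pickB_go "" tokens

-- ===== PRECONDITION & SPEC =====
def Spec_pick_generic_token_py (tokens : List String) (out : String) : Prop := out = pick_generic_token_py_alt tokens
instance (tokens : List String) (out : String) : Decidable (Spec_pick_generic_token_py tokens out) := by unfold Spec_pick_generic_token_py; infer_instance

-- ===== CLAIM (what is proved, stated in full; the proofs are below) =====
def Claim_equal_pick_generic_token_py : Prop := ∀ (tokens : List String), Dom_pick_generic_token_py tokens → Spec_pick_generic_token_py tokens (pick_generic_token_py tokens)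

-- ===== LEMMAS AND PROOFS =====

-- A's reversed scan returns the first pvIsValid element (or "")
theorem pickA_loop2_eq_find (xs : List String) :
    pickA_loop2 xs = ((xs.find? pvIsValid).getD "") := by
  induction xs with
  | nil => rfl
  | cons t ts ih =>
    simp only [pickA_loop2, List.find?]
    by_cases hd : t.toList.any PySem.Chars.isdigit
    · simp [pvIsValid, hd, ih]
    · by_cases hs : t ∈ pvQueryStopwords
      · simp [pvIsValid, hd, hs, ih]
      · by_cases hl : 4 ≤ t.length
        · simp [pvIsValid, hd, hs, hl]
        · simp [pvIsValid, hd, hs, hl, ih]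

-- B's pass, on a list with no generic token, computes the first valid element of the reverse (falling back to acc)
theorem pickB_go_eq_find (l : List String) :
    ∀ acc : String, (∀ t ∈ l, t ∉ pvGenericTokens) →
      pickB_go acc l = ((l.reverse.find? pvIsValid).getD acc) := by
  induction l with
  | nil => intro acc _; rfl
  | cons t ts ih =>
    intro acc h
    have hg : t ∉ pvGenericTokens := h t (by simp)
    simp only [pickB_go, List.reverse_cons]
    rw [if_neg (by simp [hg]), ih _ (fun u hu => h u (by simp [hu])), List.find?_append]
    cases hfind : ts.reverse.find? pvIsValid with
    | some v => simp
    | none =>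
      by_cases hv : pvIsValid t
      · simp [List.find?, hv]
      · simp [List.find?, hv]

-- if some token in the scanned suffix is generic, A's first loop and B's pass both return the first such token
theorem loop1_eq_go_of_generic (l : List String) :
    ∀ (tokens : List String) (acc : String), (∃ t ∈ l, t ∈ pvGenericTokens) →
      pickA_loop1 tokens l = pickB_go acc l := by
  induction l with
  | nil => intro _ _ h; simp at h
  | cons t ts ih =>
    intro tokens acc h
    by_cases hg : t ∈ pvGenericTokens
    · simp [pickA_loop1, pickB_go, hg]
    · have h' : ∃ u ∈ ts, u ∈ pvGenericTokens := by
        rcases h with ⟨u, hu, hgu⟩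
        rcases List.mem_cons.mp hu with rfl | hmem
        · exact absurd hgu hg
        · exact ⟨u, hmem, hgu⟩
      simp only [pickA_loop1, pickB_go]
      rw [if_neg (by simp [hg]), if_neg (by simp [hg])]
      exact ih tokens _ h' 

-- if no token is generic, A's first loop falls through to the reversed scan
theorem loop1_eq_loop2 (l : List String) :
    ∀ tokens : List String, (∀ t ∈ l, t ∉ pvGenericTokens) →
      pickA_loop1 tokens l = pickA_loop2 tokens.reverse := by
  induction l with
  | nil => intro _ _; rfl
  | cons t ts ih =>
    intro tokens h
    have hg : t ∉ pvGenericTokens := h t (by simp)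
    simp [pickA_loop1, hg, ih tokens (fun u hu => h u (by simp [hu]))]

-- ===== VERDICT (by name: the statement is the Claim_ definition above) =====
theorem pick_generic_token_py_spec : Claim_equal_pick_generic_token_py := by
  intro tokens _
  show pick_generic_token_py tokens = pick_generic_token_py_alt tokens
  unfold pick_generic_token_py pick_generic_token_py_alt
  by_cases h : ∃ t ∈ tokens, t ∈ pvGenericTokens
  · exact loop1_eq_go_of_generic tokens tokens "" h
  · have h' : ∀ t ∈ tokens, t ∉ pvGenericTokens := by
      intro t ht hc
      exact h ⟨t, ht, hc⟩
    rw [loop1_eq_loop2 tokens tokens h', pickA_loop2_eq_find,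
        pickB_go_eq_find tokens "" h']
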